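-- pv_equiv track=rewrite | github.com/uncode1/nvcfund-2.0.0-R | nvcfund-backend/scripts/route_connector.py | find_route_insertion_point
-- ===== SOURCE A (Python) =====
-- def find_route_insertion_point(routes_file_content):
--     """Find the best insertion point for new routes"""
--     lines = routes_file_content.split('\n')
--
--     # Look for the last route definition before health check or end of file
--     insertion_line = -1
--     for i, line in enumerate(lines):
--         if '@' in line and '_bp.route(' in line:
--             insertion_line = i
--         elif 'health_check' in line and 'def' in line:
--             break
--
--     return insertion_line
-- ===== SOURCE B (Python) =====
-- def find_route_insertion_point(routes_file_content):
--     """Find the best insertion point for new routes"""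
--     lines = routes_file_content.split('\n')
--
--     def is_route(line):
--         return '@' in line and '_bp.route(' in line
--
--     # Boundary: first health-check def line (a route-decorator line never counts,
--     # matching the original elif precedence); default: the whole file.
--     cutoff = len(lines)
--     for i, line in enumerate(lines):
--         if 'health_check' in line and 'def' in line and not is_route(line):
--             cutoff = i
--             break
--
--     # Last route decorator line before the boundary.
--     for i, line in reversed(list(enumerate(lines[:cutoff]))):
--         if is_route(line):
--             return i
--     return -1
-- ===== Notes on version B (the rewrite author's own statement) =====
-- stated objective: alternative
-- what changed: Replaces A's single forward pass carrying a last-seen accumulator with a boundary find (first health_check def line) followed by a reverse scan of the prefix that returns the first route-decorator line it meets.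
import Mathlib
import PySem

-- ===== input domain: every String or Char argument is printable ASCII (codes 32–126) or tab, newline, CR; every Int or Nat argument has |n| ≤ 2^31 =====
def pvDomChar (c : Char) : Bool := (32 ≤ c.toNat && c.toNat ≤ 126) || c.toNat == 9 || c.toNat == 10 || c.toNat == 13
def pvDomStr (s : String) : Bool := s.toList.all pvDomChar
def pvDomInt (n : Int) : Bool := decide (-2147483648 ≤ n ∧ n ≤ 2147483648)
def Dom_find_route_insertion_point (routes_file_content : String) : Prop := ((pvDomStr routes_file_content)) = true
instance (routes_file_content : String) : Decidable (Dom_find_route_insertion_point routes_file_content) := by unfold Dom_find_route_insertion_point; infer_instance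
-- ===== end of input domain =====

-- B replaces A's forward pass with a boundary find plus a reverse scan of the prefix (alternative decomposition, same cost).

-- ===== PORT A =====
-- A's for-loop over enumerate(lines) with the 'insertion_line' accumulator and the elif-break.
def pvALoop : List (Int × String) → Int → Int
  | [], acc => acc
  | (i, l) :: rest, acc =>
    if PySem.Str.isIn "@" l && PySem.Str.isIn "_bp.route(" l then pvALoop rest i
    else if PySem.Str.isIn "health_check" l && PySem.Str.isIn "def" l then acc
    else pvALoop rest acc

def find_route_insertion_point (routes_file_content : String) : Int :=
  pvALoop (PySem.List.enumerate ((PySem.Str.split? routes_file_content "\n").getD []) 0) (-1)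

-- ===== PORT B =====
def pvIsRoute (l : String) : Bool := PySem.Str.isIn "@" l && PySem.Str.isIn "_bp.route(" l
def pvIsBoundary (l : String) : Bool :=
  PySem.Str.isIn "health_check" l && PySem.Str.isIn "def" l && !pvIsRoute l

-- Source B's first loop: index of the first boundary line, len(lines) if none.
def pvCutoff : List String → Nat
  | [] => 0
  | l :: rest => if pvIsBoundary l then 0 else pvCutoff rest + 1

-- Source B's second loop: first route line of the reversed enumerated prefix, else -1.
def pvRevFind : List (Int × String) → Int
  | [] => -1
  | (i, l) :: rest => if pvIsRoute l then i else pvRevFind rest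

def find_route_insertion_point_alt (routes_file_content : String) : Int :=
  let lines := (PySem.Str.split? routes_file_content "\n").getD []
  pvRevFind ((PySem.List.enumerate (lines.take (pvCutoff lines)) 0).reverse)

-- ===== PRECONDITION & SPEC =====
def Spec_find_route_insertion_point (routes_file_content : String) (out : Int) : Prop := out = find_route_insertion_point_alt routes_file_content
instance (routes_file_content : String) (out : Int) : Decidable (Spec_find_route_insertion_point routes_file_content out) := by unfold Spec_find_route_insertion_point; infer_instance

-- ===== CLAIM (what is proved, stated in full; the proofs are below) =====
def Claim_equal_find_route_insertion_point : Prop := ∀ (routes_file_content : String), Dom_find_route_insertion_point routes_file_content → Spec_find_route_insertion_point routes_file_content (find_route_insertion_point routes_file_content)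

-- ===== LEMMAS AND PROOFS =====

-- pvRevFind over an append: take the left result unless the left part finds nothing
-- (on nonnegative indices, 'finds nothing' is exactly 'returns -1').
lemma pvRevFind_append (ps qs : List (Int × String)) (h : ∀ p ∈ ps, 0 ≤ p.1) :
    pvRevFind (ps ++ qs) = if pvRevFind ps = -1 then pvRevFind qs else pvRevFind ps := by
  induction ps with
  | nil => simp [pvRevFind]
  | cons p ps ih =>
    obtain ⟨i, l⟩ := p
    have hi : (0 : Int) ≤ i := h (i, l) (List.mem_cons_self ..)
    by_cases hr : pvIsRoute l
    · have : i ≠ -1 := by omega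
      simp [pvRevFind, hr, this]
    · simpa [pvRevFind, hr] using ih (fun p hp => h p (List.mem_cons_of_mem _ hp))

lemma pvRevFind_nonneg_mem (ps : List (Int × String)) (h : ∀ p ∈ ps, 0 ≤ p.1) :
    pvRevFind ps = -1 ∨ 0 ≤ pvRevFind ps := by
  induction ps with
  | nil => simp [pvRevFind]
  | cons p ps ih =>
    obtain ⟨i, l⟩ := p
    by_cases hr : pvIsRoute l
    · right; simpa [pvRevFind, hr] using h (i, l) (List.mem_cons_self ..)
    · simpa [pvRevFind, hr] using ih (fun p hp => h p (List.mem_cons_of_mem _ hp))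

lemma enum_fst_nonneg (xs : List String) (s : Int) (hs : 0 ≤ s) :
    ∀ p ∈ (PySem.List.enumerate xs s).reverse, 0 ≤ p.1 := by
  intro p hp
  rw [List.mem_reverse] at hp
  obtain ⟨k, hk, rfl⟩ := (PySem.List.mem_enumerate_iff _ _ _).1 hp
  simp; omega

-- Main invariant: A's loop over enumerate(lines, start) with accumulator acc equals
-- B's reverse scan of the enumerated prefix, with acc as the not-found default.
lemma pv_key (lines : List String) : ∀ (start acc : Int), 0 ≤ start →
    pvALoop (PySem.List.enumerate lines start) acc =
      (let R := pvRevFind ((PySem.List.enumerate (lines.take (pvCutoff lines)) start).reverse);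
       if R = -1 then acc else R) := by
  induction lines with
  | nil => intro start acc _; simp [PySem.List.enumerate_nil, pvALoop, pvCutoff, pvRevFind]
  | cons l rest ih =>
    intro start acc hs
    rw [PySem.List.enumerate_cons]
    by_cases hr : (PySem.Str.isIn "@" l && PySem.Str.isIn "_bp.route(" l) = true
    · -- route line: A records it; B's cutoff passes it and the reverse scan sees it last
      have hb : pvIsBoundary l = false := by
        unfold pvIsBoundary pvIsRoute; rw [hr]; simp
      have hA : pvALoop ((start, l) :: PySem.List.enumerate rest (start + 1)) acc
          = pvALoop (PySem.List.enumerate rest (start + 1)) start := by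
        simp only [pvALoop]; rw [if_pos hr]
      rw [hA, ih (start + 1) start (by omega)]
      have hcut : pvCutoff (l :: rest) = pvCutoff rest + 1 := by simp [pvCutoff, hb]
      rw [hcut, List.take_succ_cons, PySem.List.enumerate_cons, List.reverse_cons,
        pvRevFind_append _ _ (enum_fst_nonneg _ _ (by omega))]
      have hone : pvRevFind [(start, l)] = start := by
        simp only [pvRevFind]; rw [if_pos (show pvIsRoute l = true from hr)]
      rcases pvRevFind_nonneg_mem
          ((PySem.List.enumerate ((rest.take (pvCutoff rest))) (start + 1)).reverse)
          (enum_fst_nonneg _ _ (by omega)) with h' | h'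
      · have hst : start ≠ -1 := by omega
        simp [h', hone, hst]
      · have hne : pvRevFind
            ((PySem.List.enumerate ((rest.take (pvCutoff rest))) (start + 1)).reverse) ≠ -1 := by
          omega
        simp [hne]
    · have hrf : pvIsRoute l = false := by
        unfold pvIsRoute
        revert hr; cases (PySem.Str.isIn "@" l && PySem.Str.isIn "_bp.route(" l) <;> simp
      by_cases hbd : (PySem.Str.isIn "health_check" l && PySem.Str.isIn "def" l) = true
      · -- boundary line: A breaks with acc; B's cutoff is here, empty scan of this tail
        have hb : pvIsBoundary l = true := by
          unfold pvIsBoundary; rw [hrf, hbd]; rfl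
        have hA : pvALoop ((start, l) :: PySem.List.enumerate rest (start + 1)) acc = acc := by
          simp only [pvALoop]; rw [if_neg hr]; exact if_pos hbd
        rw [hA]
        simp [pvCutoff, hb, PySem.List.enumerate_nil, pvRevFind]
      · -- ordinary line: both sides skip it
        have hbf : (PySem.Str.isIn "health_check" l && PySem.Str.isIn "def" l) = false := by
          revert hbd
          cases (PySem.Str.isIn "health_check" l && PySem.Str.isIn "def" l) <;> simp
        have hb : pvIsBoundary l = false := by
          unfold pvIsBoundary; rw [hbf]; simp
        have hA : pvALoop ((start, l) :: PySem.List.enumerate rest (start + 1)) acc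
            = pvALoop (PySem.List.enumerate rest (start + 1)) acc := by
          simp only [pvALoop]; rw [if_neg hr]; exact if_neg hbd
        rw [hA, ih (start + 1) acc (by omega)]
        have hcut : pvCutoff (l :: rest) = pvCutoff rest + 1 := by simp [pvCutoff, hb]
        rw [hcut, List.take_succ_cons, PySem.List.enumerate_cons, List.reverse_cons,
          pvRevFind_append _ _ (enum_fst_nonneg _ _ (by omega))]
        have hone : pvRevFind [(start, l)] = -1 := by
          simp only [pvRevFind]; rw [if_neg (by rw [hrf]; simp)]
        rcases pvRevFind_nonneg_mem
            ((PySem.List.enumerate ((rest.take (pvCutoff rest))) (start + 1)).reverse)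
            (enum_fst_nonneg _ _ (by omega)) with h' | h'
        · simp [h', hone]
        · have hne : pvRevFind
              ((PySem.List.enumerate ((rest.take (pvCutoff rest))) (start + 1)).reverse) ≠ -1 := by
            omega
          simp [hne]

-- ===== VERDICT (by name: the statement is the Claim_ definition above) =====
theorem find_route_insertion_point_spec : Claim_equal_find_route_insertion_point := by
  intro s _
  unfold Spec_find_route_insertion_point find_route_insertion_point find_route_insertion_point_alt
  rw [pv_key _ 0 (-1) le_rfl]
  by_cases h : pvRevFind ((PySem.List.enumerate
      (((PySem.Str.split? s "\n").getD []).take (pvCutoff ((PySem.Str.split? s "\n").getD []))) 0).reverse) = -1 <;>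
    simp [h]
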